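-- pv_equiv track=rewrite | github.com/Ningking666/Zoomerbinis-study-allocation | Zoombinis.py | possible_study_groups
-- ===== SOURCE A (Python) =====
-- from itertools import combinations
--
-- def valid_study_group(zbinis, group):
--     members=[]
--     type_id=[]
--     common_subjects=set()
--     if len(group) !=3 and len(group) != 4:
--         return(False, None)
--     # A valid group can only have either 3 or 4 members
--     for i in group:
--         if i not in members:
--             members.append(zbinis[i])  # finding all members
--         else:
--             return(False, None)
--     for member in members:
--         type_id.append(member[0])
--         # finding type_id
--     if len(set(type_id))!=len(type_id):
--         return(False, None)
--     # make suere differnt type_id of each member in group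
--     for member in members:
--         if not common_subjects:
--             common_subjects=set(member[1])
--         else:
--             common_subjects &= set(member[1])
--             # finding common_subjects
--     if not common_subjects:
--         return (False, None)
--     else:
--         return(True, len(common_subjects))
--
-- def possible_study_groups(zbinis):
--     valid_score=[]
--     for group_size in [3, 4]:
--         for group_possible in combinations(range(len(zbinis)), group_size):
--             # listing all possible group
--             if valid_study_group(zbinis, group_possible)[0]:
--                 # checking whether it is True of False
--                 common_subjects=valid_study_group(zbinis, group_possible)[1]
--                 # finding common_subjects
--                 score= int(common_subjects) * 3 + (len(group_possible) - 2)
--     # adding three points for each subject shared by all members of the group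
--     # Add one point if the group has three members,
--     # or two points if the group has four members.
--                 valid_score.append((group_possible, score))
--                 valid_score.sort(key=lambda x: (-x[1], x[0]))
--             # sorting valid_score
--     return valid_score
-- ===== SOURCE B (Python) =====
-- def possible_study_groups(zbinis):
--     # DFS over index-annotated members with pruning on duplicate type ids,
--     # carrying the running common-subject set; one final sort.
--     def rec(pool, need, types, acc, prefix):
--         if need == 0:
--             if acc:
--                 return [(tuple(prefix), 3 * len(acc) + len(prefix) - 2)]
--             return []
--         if not pool:
--             return []
--         (i, (t, subjects)) = pool[0]
--         rest = pool[1:]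
--         out = []
--         if t not in types:
--             out = rec(rest, need - 1, types | {t},
--                       acc & set(subjects) if acc else set(subjects),
--                       prefix + [i])
--         return out + rec(rest, need, types, acc, prefix)
--
--     indexed = list(enumerate(zbinis))
--     result = rec(indexed, 3, set(), set(), []) + rec(indexed, 4, set(), set(), [])
--     result.sort(key=lambda x: (-x[1], x[0]))
--     return result
-- ===== Notes on version B (the rewrite author's own statement) =====
-- stated objective: faster
-- what changed: B replaces A's generate-and-test sweep (enumerate every index combination, run the validator twice per group, and re-sort the whole accumulator after every append) with a recursive DFS over index-annotated members that prunes branches on duplicate type ids while carrying the running type set and common-subject set, then sorts the collected results once at the end.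
import Mathlib
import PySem

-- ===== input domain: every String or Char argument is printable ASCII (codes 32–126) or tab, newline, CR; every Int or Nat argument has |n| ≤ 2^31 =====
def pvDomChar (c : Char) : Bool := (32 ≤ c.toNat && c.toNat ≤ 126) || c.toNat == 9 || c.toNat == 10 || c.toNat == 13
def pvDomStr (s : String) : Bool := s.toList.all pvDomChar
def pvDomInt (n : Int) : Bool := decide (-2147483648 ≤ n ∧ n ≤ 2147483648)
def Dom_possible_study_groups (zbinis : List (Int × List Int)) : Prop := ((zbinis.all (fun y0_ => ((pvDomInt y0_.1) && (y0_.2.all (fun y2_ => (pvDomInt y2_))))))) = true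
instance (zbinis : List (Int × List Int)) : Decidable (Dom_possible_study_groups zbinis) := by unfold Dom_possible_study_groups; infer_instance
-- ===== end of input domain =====

-- B replaces A's "enumerate every index combination, validate it twice, re-sort after each append"
-- with a pruned DFS over index-annotated members carrying the running type set and common-subject
-- set, followed by ONE final sort (objective: faster by a constant-factor mechanism).

-- Python sorts by the key (-score, index_tuple); tuple comparison is exactly the
-- lexicographic order on the cons list (-score) :: indices.
def pvKey (x : List Int × Int) : List Int := (-x.2) :: x.1

-- ===== PORT A =====
-- valid_study_group: NOTE Python's 'if i not in members' compares an int i with the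
-- (type, subjects) pairs stored in members, which is never equal in Python, so the
-- duplicate-return branch never fires and the loop always appends; zbinis[i] with i drawn
-- from range(len(zbinis)) is always in range, so the pyGetD default (0, []) is unreachable.
def pvValidA (zbinis : List (Int × List Int)) (group : List Int) : Bool × Option Int :=
  if group.length ≠ 3 ∧ group.length ≠ 4 then (false, none) else
  let members : List (Int × List Int) :=
    group.foldl (fun ms i => ms ++ [PySem.List.pyGetD zbinis i (0, [])]) []
  let type_id : List Int := members.foldl (fun ts m => ts ++ [m.1]) []
  if PySem.Set.len (PySem.Set.ofList type_id) ≠ PySem.List.len type_id then (false, none) else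
  let common : PySem.Set Int :=
    members.foldl
      (fun acc m => if acc.isEmpty then PySem.Set.ofList m.2 else PySem.Set.inter acc (PySem.Set.ofList m.2))
      PySem.Set.empty
  if common.isEmpty then (false, none) else (true, some (PySem.Set.len common))

-- possible_study_groups: for group_size in [3, 4] (sizes as Nat: combinations' r),
-- combinations(range(len(zbinis)), group_size), validate, append, sort in place each time.
def possible_study_groups (zbinis : List (Int × List Int)) : List (List Int × Int) :=
  ([3, 4] : List Nat).foldl (fun valid_score group_size =>
    (PySem.List.combinations (PySem.List.pyRange 0 (PySem.List.len zbinis) 1) group_size).foldl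
      (fun vs group_possible =>
        if (pvValidA zbinis group_possible).1 then
          -- valid ⇒ the second component is 'some …'; .getD 0 is unreachable
          let common : Int := (pvValidA zbinis group_possible).2.getD 0
          let score : Int := common * 3 + (PySem.List.len group_possible - 2)
          PySem.List.sorted (vs ++ [(group_possible, score)]) pvKey false
        else vs)
      valid_score) []

-- ===== PORT B =====
-- rec(pool, need, types, acc, prefix) from Source B: structural recursion on pool.
def pvRecB (pool : List (Int × (Int × List Int))) (need : Nat) (types : PySem.Set Int)
    (acc : PySem.Set Int) (pre : List Int) : List (List Int × Int) :=
  match need, pool with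
  | 0, _ => if acc.isEmpty then [] else [(pre, 3 * PySem.Set.len acc + PySem.List.len pre - 2)]
  | _ + 1, [] => []
  | need' + 1, (i, (t, subjects)) :: rest =>
    (if PySem.Set.contains types t then []
     else pvRecB rest need' (PySem.Set.add types t)
            (if acc.isEmpty then PySem.Set.ofList subjects else PySem.Set.inter acc (PySem.Set.ofList subjects))
            (pre ++ [i]))
    ++ pvRecB rest (need' + 1) types acc pre

def possible_study_groups_alt (zbinis : List (Int × List Int)) : List (List Int × Int) :=
  let indexed := PySem.List.enumerate zbinis
  PySem.List.sorted
    (pvRecB indexed 3 PySem.Set.empty PySem.Set.empty [] ++ pvRecB indexed 4 PySem.Set.empty PySem.Set.empty [])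
    pvKey false

-- ===== PRECONDITION & SPEC =====
def Spec_possible_study_groups (zbinis : List (Int × List Int)) (out : List (List Int × Int)) : Prop := out = possible_study_groups_alt zbinis
instance (zbinis : List (Int × List Int)) (out : List (List Int × Int)) : Decidable (Spec_possible_study_groups zbinis out) := by unfold Spec_possible_study_groups; infer_instance

-- ===== CLAIM (what is proved, stated in full; the proofs are below) =====
def Claim_equal_possible_study_groups : Prop := ∀ (zbinis : List (Int × List Int)), Dom_possible_study_groups zbinis → Spec_possible_study_groups zbinis (possible_study_groups zbinis)

-- ===== LEMMAS AND PROOFS =====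

-- pvEmit: finish one already-chosen combination from the carried state (the "straight-line"
-- reading of pvRecB's success path).
def pvEmit (types acc : PySem.Set Int) (pre : List Int) :
    List (Int × (Int × List Int)) → List (List Int × Int)
  | [] => if acc.isEmpty then [] else [(pre, 3 * PySem.Set.len acc + PySem.List.len pre - 2)]
  | (i, (t, subjects)) :: rest =>
    if PySem.Set.contains types t then []
    else pvEmit (PySem.Set.add types t)
           (if acc.isEmpty then PySem.Set.ofList subjects else PySem.Set.inter acc (PySem.Set.ofList subjects))
           (pre ++ [i]) rest

lemma pvRecB_eq_flatMap (pool : List (Int × (Int × List Int))) (need : Nat)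
    (types acc : PySem.Set Int) (pre : List Int) :
    pvRecB pool need types acc pre
      = (PySem.List.combinations pool need).flatMap (pvEmit types acc pre) := by
  induction pool generalizing need types acc pre with
  | nil =>
    cases need with
    | zero => simp [pvRecB, pvEmit, PySem.List.combinations_zero]
    | succ n => simp [pvRecB, PySem.List.combinations_nil_succ]
  | cons x rest ih =>
    obtain ⟨i, t, subjects⟩ := x
    cases need with
    | zero => simp [pvRecB, pvEmit, PySem.List.combinations_zero]
    | succ n =>
      rw [pvRecB, PySem.List.combinations_cons_succ, List.flatMap_append, List.flatMap_map]
      simp only [pvEmit, ih]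
      split <;> simp

def pvTypesOK : PySem.Set Int → List Int → Bool
  | _, [] => true
  | s, t :: ts => !PySem.Set.contains s t && pvTypesOK (PySem.Set.add s t) ts

def pvAccF (acc : PySem.Set Int) (subs : List (List Int)) : PySem.Set Int :=
  subs.foldl (fun a s => if a.isEmpty then PySem.Set.ofList s else PySem.Set.inter a (PySem.Set.ofList s)) acc

lemma pvEmit_spec (gs : List (Int × (Int × List Int))) (types acc : PySem.Set Int) (pre : List Int) :
    pvEmit types acc pre gs
      = if pvTypesOK types (gs.map (·.2.1)) && !(pvAccF acc (gs.map (·.2.2))).isEmpty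
        then [(pre ++ gs.map (·.1),
               3 * PySem.Set.len (pvAccF acc (gs.map (·.2.2))) + PySem.List.len (pre ++ gs.map (·.1)) - 2)]
        else [] := by
  induction gs generalizing types acc pre with
  | nil => simp [pvEmit, pvTypesOK, pvAccF]
  | cons x rest ih =>
    obtain ⟨i, t, subjects⟩ := x
    rw [pvEmit, ih]
    by_cases h : PySem.Set.contains types t
    · have hm : t ∈ types := List.mem_of_elem_eq_true h
      simp [hm, pvTypesOK]
    · simp only [h, pvTypesOK, pvAccF, List.map_cons, List.foldl_cons,
        Bool.not_false, Bool.true_and, List.append_assoc] at *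
      simp [h]

lemma pvLen_update_le (ts : List Int) (s : PySem.Set Int) :
    (PySem.Set.update s ts).length ≤ s.length + ts.length := by
  induction ts generalizing s with
  | nil => simp [PySem.Set.update]
  | cons t ts ih =>
    rw [PySem.Set.update_cons]
    refine le_trans (ih _) ?_
    have : (PySem.Set.add s t).length ≤ s.length + 1 := by
      rw [PySem.Set.add_eq_ite]; split <;> simp
    simp only [List.length_cons]
    omega

lemma pvTypesOK_len (ts : List Int) (s : PySem.Set Int) :
    pvTypesOK s ts = decide ((PySem.Set.update s ts).length = s.length + ts.length) := by
  induction ts generalizing s with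
  | nil => simp [pvTypesOK, PySem.Set.update_nil]
  | cons t ts ih =>
    rw [pvTypesOK, PySem.Set.update_cons, ih]
    by_cases hm : t ∈ s
    · have hc : PySem.Set.contains s t = true := List.elem_eq_true_of_mem hm
      have hlen := pvLen_update_le ts (PySem.Set.add s t)
      rw [PySem.Set.add_of_mem hm] at hlen ⊢
      simp only [hc, Bool.not_true, Bool.false_and]
      have : ¬ ((PySem.Set.update s ts).length = s.length + (ts.length + 1)) := by omega
      simp [this]
    · have hc : ¬ PySem.Set.contains s t = true := fun h => hm (List.mem_of_elem_eq_true h)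
      simp only [hc, Bool.not_eq_true] at *
      rw [PySem.Set.add_of_not_mem hm]
      simp only [Bool.not_false, Bool.true_and]
      apply decide_eq_decide.mpr
      simp [List.length_append]
      omega

lemma pvFlatMapIf {α β : Type} (l : List α) (p : α → Bool) (f : α → β) :
    l.flatMap (fun x => if p x then [f x] else []) = (l.filter p).map f := by
  induction l with
  | nil => rfl
  | cons a l ih => rw [List.flatMap_cons, ih, List.filter_cons]; split <;> simp_all

lemma pvSortStep (l : List (List Int × Int)) (x : List Int × Int) :
    PySem.List.sorted (PySem.List.sorted l pvKey false ++ [x]) pvKey false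
      = PySem.List.sorted (l ++ [x]) pvKey false := by
  have h := PySem.List.sorted_sorted l pvKey
  simp only [PySem.List.sorted, List.foldl_append, List.foldl_cons, List.foldl_nil] at h ⊢
  have hi : (LinearOrder.toDecidableLT : DecidableLT (List Int)) = fun a b => a.decidableLT b :=
    Subsingleton.elim _ _
  rw [hi] at h
  congr 1

lemma pvFoldSort (c : List Int → Bool) (sc : List Int → Int) (L : List (List Int))
    (m : List (List Int × Int)) :
    L.foldl (fun vs g => if c g then PySem.List.sorted (vs ++ [(g, sc g)]) pvKey false else vs)
        (PySem.List.sorted m pvKey false)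
      = PySem.List.sorted (m ++ (L.filter c).map (fun g => (g, sc g))) pvKey false := by
  induction L generalizing m with
  | nil => simp
  | cons a L ih =>
    rw [List.foldl_cons]
    by_cases h : c a
    · simp only [h, if_true]
      rw [pvSortStep, ih (m ++ [(a, sc a)])]
      simp [h, List.append_assoc]
    · simp [h, ih m]

-- pvFoldSort instantiated with the exact loop body of port A's inner loop
lemma pvASort (zbinis : List (Int × List Int)) (L : List (List Int)) (m m' : List (List Int × Int))
    (hm : m' = PySem.List.sorted m pvKey false) :
    L.foldl (fun vs group_possible =>
        if (pvValidA zbinis group_possible).1 then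
          PySem.List.sorted
            (vs ++ [(group_possible,
              (pvValidA zbinis group_possible).2.getD 0 * 3 + (PySem.List.len group_possible - 2))])
            pvKey false
        else vs)
      m'
      = PySem.List.sorted
          (m ++ (L.filter (fun g => (pvValidA zbinis g).1)).map
            (fun g => (g, (pvValidA zbinis g).2.getD 0 * 3 + (PySem.List.len g - 2))))
          pvKey false := by
  subst hm
  exact pvFoldSort _ _ L m

lemma pvRec_eq_items (zbinis : List (Int × List Int)) (k : Nat) (hk : k = 3 ∨ k = 4) :
    pvRecB (PySem.List.enumerate zbinis) k PySem.Set.empty PySem.Set.empty []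
      = ((PySem.List.combinations (PySem.List.pyRange 0 (PySem.List.len zbinis) 1) k).filter
            (fun g => (pvValidA zbinis g).1)).map
          (fun g => (g, (pvValidA zbinis g).2.getD 0 * 3 + (PySem.List.len g - 2))) := by
  rw [pvRecB_eq_flatMap, PySem.List.enumerate_eq_map_pyRange zbinis ((0 : Int), ([] : List Int)),
    PySem.List.combinations_map, List.flatMap_map, ← pvFlatMapIf]
  apply List.flatMap_congr
  intro g hg
  have hlen : g.length = k := PySem.List.length_of_mem_combinations hg
  rw [pvEmit_spec]
  have hnot : ¬ (g.length ≠ 3 ∧ g.length ≠ 4) := by omega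
  have hval : pvValidA zbinis g
      = (if PySem.Set.len (PySem.Set.ofList (g.map (fun x => (PySem.List.pyGetD zbinis x ((0:Int), ([]:List Int))).1)))
             ≠ PySem.List.len (g.map (fun x => (PySem.List.pyGetD zbinis x ((0:Int), ([]:List Int))).1))
         then ((false, none) : Bool × Option Int)
         else
           if (g.foldl (fun acc x =>
                 if List.isEmpty acc then PySem.Set.ofList (PySem.List.pyGetD zbinis x ((0:Int), ([]:List Int))).2
                 else PySem.Set.inter acc (PySem.Set.ofList (PySem.List.pyGetD zbinis x ((0:Int), ([]:List Int))).2))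
               PySem.Set.empty).isEmpty
           then (false, none)
           else (true, some (PySem.Set.len (g.foldl (fun acc x =>
             if List.isEmpty acc then PySem.Set.ofList (PySem.List.pyGetD zbinis x ((0:Int), ([]:List Int))).2
             else PySem.Set.inter acc (PySem.Set.ofList (PySem.List.pyGetD zbinis x ((0:Int), ([]:List Int))).2))
             PySem.Set.empty)))) := by
    rw [pvValidA, if_neg hnot]
    simp only [PySem.List.foldl_append_singleton_eq_map, List.nil_append, List.foldl_map]
  rw [hval]
  conv_lhs => simp only [List.map_map, Function.comp_def, List.nil_append, pvAccF,
    List.foldl_map, List.map_id', List.map_id'']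
  rw [pvTypesOK_len]
  rw [show PySem.Set.update (PySem.Set.empty (α := Int))
        (List.map (fun x => (PySem.List.pyGetD zbinis x ((0:Int), ([]:List Int))).1) g)
      = PySem.Set.ofList (List.map (fun x => (PySem.List.pyGetD zbinis x ((0:Int), ([]:List Int))).1) g) from rfl]
  set T := List.foldl (fun acc x =>
      if List.isEmpty acc then PySem.Set.ofList (PySem.List.pyGetD zbinis x ((0:Int), ([]:List Int))).2
      else PySem.Set.inter acc (PySem.Set.ofList (PySem.List.pyGetD zbinis x ((0:Int), ([]:List Int))).2))
    PySem.Set.empty g with hT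
  set tys := List.map (fun x => (PySem.List.pyGetD zbinis x ((0:Int), ([]:List Int))).1) g with htys
  by_cases h1 : (PySem.Set.ofList tys).length = tys.length
  · by_cases h2 : T.isEmpty
    · simp [h1, h2, PySem.Set.len, PySem.List.len, PySem.Set.empty]
    · simp [h1, h2, PySem.Set.len, PySem.List.len, PySem.Set.empty]
      ring
  · simp [h1]

theorem possible_study_groups_spec : Claim_equal_possible_study_groups := by
  intro zbinis _
  unfold Spec_possible_study_groups
  rw [possible_study_groups]
  simp only [List.foldl_cons, List.foldl_nil]
  rw [pvASort zbinis _ [] [] rfl]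
  rw [pvASort zbinis _ _ _ rfl]
  rw [possible_study_groups_alt]
  rw [pvRec_eq_items zbinis 3 (Or.inl rfl), pvRec_eq_items zbinis 4 (Or.inr rfl)]
  simp
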